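-- pv_equiv track=rewrite | github.com/xzrm/algo-practice | python3/hackerrank_min_time_required.py | calc_days
-- ===== SOURCE A (Python) =====
-- def calc_days(min_days, max_days, goal, machines):
--     mid_days = (min_days + max_days) // 2
--
--     if not min_days < max_days:
--         return mid_days
--
--     tot_prod = sum(mid_days // m for m in machines)
--
--     if tot_prod >= goal:
--         return calc_days(min_days, mid_days, goal, machines)
--     else:
--         return calc_days(mid_days + 1, max_days, goal, machines)
-- ===== SOURCE B (Python) =====
-- def calc_days(min_days, max_days, goal, machines):
--     lo, hi = min_days, max_days
--     while lo < hi: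
--         mid = (lo + hi) // 2
--         if sum(mid // m for m in machines) >= goal:
--             hi = mid
--         else:
--             lo = mid + 1
--     return (lo + hi) // 2
-- ===== Notes on version B (the rewrite author's own statement) =====
-- stated objective: idiomatic
-- what changed: Replaces the recursive binary search with an iterative while-loop over local lo/hi bounds, returning the midpoint after the loop (which uniformly covers the base case).
import Mathlib
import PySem

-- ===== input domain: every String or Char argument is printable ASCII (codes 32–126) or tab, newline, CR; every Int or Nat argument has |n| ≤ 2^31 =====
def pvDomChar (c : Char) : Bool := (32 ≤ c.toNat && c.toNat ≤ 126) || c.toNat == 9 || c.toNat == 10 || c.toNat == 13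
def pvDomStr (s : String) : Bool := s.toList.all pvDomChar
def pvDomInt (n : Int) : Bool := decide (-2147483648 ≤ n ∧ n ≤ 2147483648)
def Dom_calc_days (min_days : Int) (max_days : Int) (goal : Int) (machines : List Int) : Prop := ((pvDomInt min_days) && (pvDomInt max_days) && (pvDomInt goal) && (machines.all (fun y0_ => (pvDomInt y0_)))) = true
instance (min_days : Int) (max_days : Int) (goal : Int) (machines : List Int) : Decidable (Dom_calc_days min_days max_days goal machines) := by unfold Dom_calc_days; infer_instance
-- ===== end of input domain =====

-- B replaces A's recursive binary search by an iterative lo/hi while-loop state (same cost); return values proved equal wherever A returns.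


-- ===== PORT A =====
def calc_days (min_days : Int) (max_days : Int) (goal : Int) (machines : List Int) : Int :=
  let mid_days := PySem.Int.floordiv (min_days + max_days) 2
  if h : min_days < max_days then
    let tot_prod := machines.foldl (fun acc m => acc + PySem.Int.floordiv mid_days m) 0
    if tot_prod ≥ goal then
      calc_days min_days mid_days goal machines
    else
      calc_days (mid_days + 1) max_days goal machines
  else
    mid_days
termination_by (max_days - min_days).toNat
decreasing_by
  all_goals
    have h1 : PySem.Int.floordiv (min_days + max_days) 2 < max_days :=
      (PySem.Int.floordiv_lt_iff_lt_mul (by omega)).mpr (by omega)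
    have h2 := (PySem.Int.floordiv_two_mid_bounds (le_of_lt h)).1
    omega


-- ===== PORT B =====
-- the while-loop of Source B: state (lo, hi), iterated while lo < hi
def calcLoop (goal : Int) (machines : List Int) (lo : Int) (hi : Int) : Int × Int :=
  if h : lo < hi then
    let mid := PySem.Int.floordiv (lo + hi) 2
    if machines.foldl (fun acc m => acc + PySem.Int.floordiv mid m) 0 ≥ goal then
      calcLoop goal machines lo mid
    else
      calcLoop goal machines (mid + 1) hi
  else
    (lo, hi)
termination_by (hi - lo).toNat
decreasing_by
  all_goals
    have h1 : PySem.Int.floordiv (lo + hi) 2 < hi :=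
      (PySem.Int.floordiv_lt_iff_lt_mul (by omega)).mpr (by omega)
    have h2 := (PySem.Int.floordiv_two_mid_bounds (le_of_lt h)).1
    omega

def calc_days_alt (min_days : Int) (max_days : Int) (goal : Int) (machines : List Int) : Int :=
  let p := calcLoop goal machines min_days max_days
  PySem.Int.floordiv (p.1 + p.2) 2

-- ===== PRECONDITION & SPEC =====
-- Pre_ excludes exactly the inputs on which Python A raises ZeroDivisionError:
-- a machine of rate 0 while the search range is non-degenerate (min_days < max_days).
def Pre_calc_days (min_days : Int) (max_days : Int) (goal : Int) (machines : List Int) : Prop :=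
  min_days < max_days → (0 : Int) ∉ machines
instance (min_days : Int) (max_days : Int) (goal : Int) (machines : List Int) : Decidable (Pre_calc_days min_days max_days goal machines) := by unfold Pre_calc_days; infer_instance

def pvWitness_calc_days : Int × Int × Int × List Int := (1, 10, 8, [2, 3])

def Spec_calc_days (min_days : Int) (max_days : Int) (goal : Int) (machines : List Int) (out : Int) : Prop := out = calc_days_alt min_days max_days goal machines
instance (min_days : Int) (max_days : Int) (goal : Int) (machines : List Int) (out : Int) : Decidable (Spec_calc_days min_days max_days goal machines out) := by unfold Spec_calc_days; infer_instance

-- ===== CLAIM (what is proved, stated in full; the proofs are below) =====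
def Claim_equal_calc_days : Prop := ∀ (min_days : Int) (max_days : Int) (goal : Int) (machines : List Int), Dom_calc_days min_days max_days goal machines → Pre_calc_days min_days max_days goal machines → Spec_calc_days min_days max_days goal machines (calc_days min_days max_days goal machines)

-- ===== LEMMAS AND PROOFS =====

-- The recursive search equals the midpoint of the while-loop's final (lo, hi) state
-- (after the loop lo = hi whenever it ran, so the midpoint is also A's base-case value).
theorem calc_days_eq_loop (goal : Int) (machines : List Int) :
    ∀ (lo hi : Int), calc_days lo hi goal machines =
      PySem.Int.floordiv ((calcLoop goal machines lo hi).1 + (calcLoop goal machines lo hi).2) 2 := by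
  intro lo hi
  fun_induction calc_days lo hi goal machines with
  | case1 a b mid h tot htot ih =>
      have hmid : mid = PySem.Int.floordiv (a + b) 2 := rfl
      have htot2 : machines.foldl (fun acc m => acc + PySem.Int.floordiv mid m) 0 ≥ goal := by
        have ht : tot = machines.attach.foldl
            (fun acc x => match x with | ⟨m, _⟩ => acc + PySem.Int.floordiv mid m) 0 := rfl
        rw [ht] at htot
        simpa [List.foldl_attach] using htot
      rw [calcLoop]
      simp only [dif_pos h, ← hmid]
      split
      next => exact ih
      next hc => exact absurd htot2 hc
  | case2 a b mid h tot htot ih =>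
      have hmid : mid = PySem.Int.floordiv (a + b) 2 := rfl
      have htot2 : ¬ machines.foldl (fun acc m => acc + PySem.Int.floordiv mid m) 0 ≥ goal := by
        have ht : tot = machines.attach.foldl
            (fun acc x => match x with | ⟨m, _⟩ => acc + PySem.Int.floordiv mid m) 0 := rfl
        rw [ht] at htot
        simp at htot
        omega
      rw [calcLoop]
      simp only [dif_pos h, ← hmid]
      split
      next hc => exact absurd hc htot2
      next => exact ih
  | case3 a b mid h =>
      rw [calcLoop]
      simp only [dif_neg h]
      exact rfl

-- ===== VERDICT (by name: the statement is the Claim_ definition above) =====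
theorem calc_days_spec : Claim_equal_calc_days := by
  intro min_days max_days goal machines _ _
  unfold Spec_calc_days calc_days_alt
  exact calc_days_eq_loop goal machines min_days max_days
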